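-- pv_equiv track=rewrite | github.com/Adamyangs/omni_decision_platform | src/子课题2.2：多模态多任务通用智能决策关键技术/PADDLE/core/symbolicEnvironment.py | door_agent_exclusive
-- ===== SOURCE A (Python) =====
-- def door_agent_exclusive(path):
--     new_path = []
--     for idx, obj in enumerate(path):
--         if (idx == 0 and 10 in obj) or ((idx == 0 and 4 in obj)) or (idx == len(path) - 1 and 10 in obj) or (
--                 idx == len(path) - 1 and 4 in obj):
--             pass
--         else:
--             new_path.append(obj)
--     return new_path
-- ===== SOURCE B (Python) =====
-- def door_agent_exclusive(path):
--     items = list(path)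
--     lo, hi = 0, len(items)
--     if items and (10 in items[0] or 4 in items[0]):
--         lo = 1
--     if hi > lo and (10 in items[-1] or 4 in items[-1]):
--         hi -= 1
--     return items[lo:hi]
-- ===== Notes on version B (the rewrite author's own statement) =====
-- stated objective: simpler
-- what changed: Replaces the indexed loop that tests every element against idx==0 and idx==len-1 with a direct computation of two slice bounds (bump lo if the first element contains 10 or 4, drop hi if the last does and hi>lo) and one final slice.
import Mathlib
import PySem

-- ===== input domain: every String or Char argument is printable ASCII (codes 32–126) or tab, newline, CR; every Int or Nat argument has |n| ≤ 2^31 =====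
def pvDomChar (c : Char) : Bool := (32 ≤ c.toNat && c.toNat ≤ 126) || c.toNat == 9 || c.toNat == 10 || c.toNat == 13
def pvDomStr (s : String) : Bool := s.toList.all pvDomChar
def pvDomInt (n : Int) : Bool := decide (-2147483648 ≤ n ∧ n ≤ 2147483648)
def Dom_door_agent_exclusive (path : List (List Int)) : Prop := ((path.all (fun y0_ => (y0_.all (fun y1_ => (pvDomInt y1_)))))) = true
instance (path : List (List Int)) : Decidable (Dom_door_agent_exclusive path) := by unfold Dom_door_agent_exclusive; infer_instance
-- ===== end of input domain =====

-- B drops boundary elements by computing two slice bounds instead of looping with an index test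
-- over every element (objective: simpler; same return value on all inputs).

-- ===== PORT A =====
def door_agent_exclusive (path : List (List Int)) : List (List Int) :=
  (PySem.List.enumerate path 0).foldl
    (fun new_path p =>
      if (p.1 == 0 && p.2.contains 10) || (p.1 == 0 && p.2.contains 4)
         || (p.1 == (path.length : Int) - 1 && p.2.contains 10)
         || (p.1 == (path.length : Int) - 1 && p.2.contains 4)
      then new_path
      else new_path ++ [p.2]) []

-- ===== PORT B =====
-- helper for '10 in obj or 4 in obj'
def pvBoundaryBad (obj : List Int) : Bool := obj.contains 10 || obj.contains 4

def door_agent_exclusive_alt (path : List (List Int)) : List (List Int) :=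
  let items := path
  let n := items.length
  let lo : Nat := if !items.isEmpty && pvBoundaryBad items.headI then 1 else 0
  let hi : Nat := if decide (lo < n) && pvBoundaryBad (items.getLastD []) then n - 1 else n
  (items.drop lo).take (hi - lo)   -- items[lo:hi] with 0 ≤ lo ≤ hi ≤ n

-- ===== PRECONDITION & SPEC =====
def Spec_door_agent_exclusive (path : List (List Int)) (out : List (List Int)) : Prop := out = door_agent_exclusive_alt path
instance (path : List (List Int)) (out : List (List Int)) : Decidable (Spec_door_agent_exclusive path out) := by unfold Spec_door_agent_exclusive; infer_instance

-- ===== CLAIM (what is proved, stated in full; the proofs are below) =====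
def Claim_equal_door_agent_exclusive : Prop := ∀ (path : List (List Int)), Dom_door_agent_exclusive path → Spec_door_agent_exclusive path (door_agent_exclusive path)

-- ===== LEMMAS AND PROOFS =====

-- A's skip-condition, as a predicate on an (index, element) pair
def pvCond (n : Int) (p : Int × List Int) : Bool :=
  (p.1 == 0 && p.2.contains 10) || (p.1 == 0 && p.2.contains 4)
  || (p.1 == n - 1 && p.2.contains 10) || (p.1 == n - 1 && p.2.contains 4)

theorem doorA_eq_filter (path : List (List Int)) :
    door_agent_exclusive path =
      (((PySem.List.enumerate path 0).filter (fun p => !pvCond (path.length : Int) p)).map (·.2)) := by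
  unfold door_agent_exclusive
  have hfun : (fun (new_path : List (List Int)) (p : Int × List Int) =>
      if (p.1 == 0 && p.2.contains 10) || (p.1 == 0 && p.2.contains 4)
         || (p.1 == (path.length : Int) - 1 && p.2.contains 10)
         || (p.1 == (path.length : Int) - 1 && p.2.contains 4)
      then new_path else new_path ++ [p.2]) =
      (fun new_path p => if (!pvCond (path.length : Int) p) = true
        then new_path ++ [(·.2) p] else new_path) := by
    funext acc p
    simp only [pvCond, Bool.not_eq_true']
    by_cases h10 : (10 : Int) ∈ p.2 <;> by_cases h4 : (4 : Int) ∈ p.2 <;>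
      by_cases h0 : p.1 = 0 <;> by_cases hl : p.1 = (path.length : Int) - 1 <;>
      simp [h10, h4, h0, hl]
  rw [hfun, PySem.List.foldl_append_if]
  simp

theorem middle_kept (m : List (List Int)) (n : Int) (s : Int)
    (hs : 1 ≤ s) (hub : s + m.length ≤ n - 1) :
    (PySem.List.enumerate m s).filter (fun p => !pvCond n p) = PySem.List.enumerate m s := by
  apply List.filter_eq_self.mpr
  intro p hp
  rcases (PySem.List.mem_enumerate_iff _ _ _).1 hp with ⟨k, hk, rfl⟩
  simp only [pvCond, Bool.not_eq_true']
  have h0 : ¬ (s + (k : Int) = 0) := by omega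
  have h1 : ¬ (s + (k : Int) = n - 1) := by omega
  simp [h0, h1]

theorem doorB_concat (a b : List Int) (m : List (List Int)) :
    door_agent_exclusive_alt (a :: (m ++ [b])) =
    (if pvBoundaryBad a then [] else [a]) ++ m ++ (if pvBoundaryBad b then [] else [b]) := by
  have hlast : (a :: (m ++ [b])).getLastD [] = b := by
    rw [← List.cons_append, List.getLastD_concat]
  unfold door_agent_exclusive_alt
  simp only [List.isEmpty_cons, List.headI_cons, hlast, List.length_cons, List.length_append,
    Bool.not_false, Bool.true_and]
  by_cases ha : pvBoundaryBad a = true <;> by_cases hb : pvBoundaryBad b = true <;>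
    simp [ha, hb]

theorem door_agent_exclusive_spec : Claim_equal_door_agent_exclusive := by
  unfold Claim_equal_door_agent_exclusive
  intro path _
  unfold Spec_door_agent_exclusive
  rw [doorA_eq_filter]
  cases path with
  | nil => simp [door_agent_exclusive_alt, PySem.List.enumerate]
  | cons a t =>
    rcases List.eq_nil_or_concat t with rfl | ⟨m, b, rfl⟩
    · -- single element [a]
      by_cases ha : pvBoundaryBad a = true <;>
        simp_all [door_agent_exclusive_alt, pvBoundaryBad, pvCond,
          PySem.List.enumerate, Bool.or_comm, Bool.or_left_comm] <;> tauto
    · -- at least two elements: a :: m ++ [b]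
      simp only [List.concat_eq_append]
      have hlen : (a :: (m ++ [b])).length = m.length + 2 := by simp
      rw [PySem.List.enumerate_cons, PySem.List.enumerate_append, PySem.List.enumerate_cons]
      simp only [zero_add, PySem.List.enumerate_nil, List.filter_cons, List.filter_append,
        List.filter_nil]
      rw [middle_kept m ((a :: (m ++ [b])).length : Int) 1 (by omega) (by simp; omega)]
      have e1 : ((1 : Int) + ↑m.length) = ((m.length : Int) + 1) := by ring
      have e0 : (((m.length : Int) + 1) == (0 : Int)) = false := by
        simp; omega
      have e2 : ((0 : Int) == ((m.length : Int) + 1)) = false := by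
        simp; omega
      have hna : pvCond ((a :: (m ++ [b])).length : Int) (0, a) = pvBoundaryBad a := by
        simp [pvCond, pvBoundaryBad, e2]
      have hnb : pvCond ((a :: (m ++ [b])).length : Int) (1 + (m.length : Int), b)
          = pvBoundaryBad b := by
        simp [pvCond, pvBoundaryBad, e1, e0]
      by_cases ha : pvBoundaryBad a = true <;> by_cases hb : pvBoundaryBad b = true <;>
        simp only [hna, hnb, ha, hb, Bool.not_true, Bool.not_false, if_true] <;>
        simp [doorB_concat, ha, hb, PySem.List.map_snd_enumerate]
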